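-- pv_equiv track=rewrite | github.com/fuhailin/Recommender-System | Probabilistic Matrix Factorization/CleanData.py | Get_tag_num
-- ===== SOURCE A (Python) =====
-- def Get_tag_num(tagset, usertag):
--     tagcount = dict()
--     for tag in tagset:
--         tagcount.setdefault(tag, 0)
--         for item in usertag.values():
--             if tag in item:
--                 tagcount[tag] += 1
--     return tagcount
-- ===== SOURCE B (Python) =====
-- def Get_tag_num(tagset, usertag):
--     # One pass over the users: each user's distinct tags bump a base counter once;
--     # a tag listed m times in tagset ends up (as in A) with m * its user count.
--     wanted = set(tagset)
--     base = {}
--     for item in usertag.values():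
--         for t in set(item):
--             if t in wanted:
--                 base[t] = base.get(t, 0) + 1
--     mult = {}
--     for t in tagset:
--         mult[t] = mult.get(t, 0) + 1
--     return {t: mult[t] * base.get(t, 0) for t in tagset}
-- ===== Notes on version B (the rewrite author's own statement) =====
-- stated objective: faster
-- what changed: Replaces the per-tag scan over all users (membership test per user per tag) by a single pass over the users that increments a hash-map counter for each distinct tag of a user that occurs in tagset, plus a tag-multiplicity counter to reproduce A's count exactly on repeated tags.
import Mathlib
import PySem

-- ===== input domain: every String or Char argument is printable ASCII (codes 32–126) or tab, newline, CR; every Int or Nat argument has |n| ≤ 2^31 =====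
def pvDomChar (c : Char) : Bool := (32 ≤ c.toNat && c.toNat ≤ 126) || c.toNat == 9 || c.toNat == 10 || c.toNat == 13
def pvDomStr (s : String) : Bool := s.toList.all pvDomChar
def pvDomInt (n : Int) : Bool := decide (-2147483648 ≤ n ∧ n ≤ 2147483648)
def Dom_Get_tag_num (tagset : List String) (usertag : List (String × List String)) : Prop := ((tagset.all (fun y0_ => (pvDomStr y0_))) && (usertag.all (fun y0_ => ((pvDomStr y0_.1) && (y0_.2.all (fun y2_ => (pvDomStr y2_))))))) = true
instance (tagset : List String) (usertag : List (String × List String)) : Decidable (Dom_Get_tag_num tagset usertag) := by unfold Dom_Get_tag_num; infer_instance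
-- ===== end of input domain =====

-- B replaces A's per-tag scan over all users by one pass over the users with hash-map counters; return value proved equal.


-- ===== PORT A =====
def Get_tag_num (tagset : List String) (usertag : List (String × List String)) : List (String × Int) :=
  (tagset.foldl
    (fun tagcount tag =>
      ((PySem.Dict.ofList usertag).values).foldl
        (fun tc item => if tag ∈ item then tc.modify tag 0 (· + 1) else tc)
        (tagcount.setdefault tag 0))
    PySem.Dict.empty).items

-- ===== PORT B =====
def Get_tag_num_alt (tagset : List String) (usertag : List (String × List String)) : List (String × Int) :=
  let wanted : PySem.Set String := PySem.Set.ofList tagset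
  let base : PySem.Dict String Int :=
    ((PySem.Dict.ofList usertag).values).foldl
      (fun b item =>
        (PySem.Set.ofList item).foldl
          (fun b t => if PySem.Set.contains wanted t then b.insert t (b.getD t 0 + 1) else b)
          b)
      PySem.Dict.empty
  let mult : PySem.Dict String Int :=
    tagset.foldl (fun m t => m.insert t (m.getD t 0 + 1)) PySem.Dict.empty
  (tagset.foldl (fun out t => out.insert t (mult.getD t 0 * base.getD t 0)) PySem.Dict.empty).items

-- ===== PRECONDITION & SPEC =====
def Spec_Get_tag_num (tagset : List String) (usertag : List (String × List String)) (out : List (String × Int)) : Prop := out = Get_tag_num_alt tagset usertag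
instance (tagset : List String) (usertag : List (String × List String)) (out : List (String × Int)) : Decidable (Spec_Get_tag_num tagset usertag out) := by unfold Spec_Get_tag_num; infer_instance

-- ===== CLAIM (what is proved, stated in full; the proofs are below) =====
def Claim_equal_Get_tag_num : Prop := ∀ (tagset : List String) (usertag : List (String × List String)), Dom_Get_tag_num tagset usertag → Spec_Get_tag_num tagset usertag (Get_tag_num tagset usertag)

-- ===== LEMMAS AND PROOFS =====

theorem innerA_keys (vals : List (List String)) (tag : String) (d : PySem.Dict String Int)
    (h : d.contains tag = true) :
    (vals.foldl (fun tc item => if tag ∈ item then tc.modify tag 0 (· + 1) else tc) d).keys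
      = d.keys := by
  induction vals generalizing d with
  | nil => rfl
  | cons item rest ih =>
    simp only [List.foldl_cons]
    split_ifs with hm
    · rw [ih _ (by rw [PySem.Dict.contains_modify]; simp [h]),
        PySem.Dict.keys_modify, PySem.Dict.keys_insert_of_contains _ _ h]
    · exact ih d h

theorem innerA_getD (vals : List (List String)) (tag : String) (d : PySem.Dict String Int) (t : String) :
    (vals.foldl (fun tc item => if tag ∈ item then tc.modify tag 0 (· + 1) else tc) d).getD t 0
      = d.getD t 0 + if t = tag then (vals.countP (fun item => decide (tag ∈ item)) : Int) else 0 := by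
  induction vals generalizing d with
  | nil => simp
  | cons item rest ih =>
    simp only [List.foldl_cons, List.countP_cons]
    by_cases hm : tag ∈ item
    · rw [if_pos hm, ih, PySem.Dict.getD_modify]
      by_cases ht : t = tag
      · subst ht; simp [hm]; ring
      · simp [ht]
    · rw [if_neg hm, ih]
      simp [hm]

-- A's outer loop: keys accumulate like set-update, value at t is count(t in processed) * usercount(t)
theorem outerA (vals : List (List String)) (l : List String) (d : PySem.Dict String Int) :
    ((l.foldl (fun tagcount tag =>
        vals.foldl (fun tc item => if tag ∈ item then tc.modify tag 0 (· + 1) else tc)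
          (tagcount.setdefault tag 0)) d).keys = PySem.Set.update d.keys l)
    ∧ ∀ t : String, (l.foldl (fun tagcount tag =>
        vals.foldl (fun tc item => if tag ∈ item then tc.modify tag 0 (· + 1) else tc)
          (tagcount.setdefault tag 0)) d).getD t 0
      = d.getD t 0 + (l.count t : Int) * (vals.countP (fun item => decide (t ∈ item)) : Int) := by
  induction l generalizing d with
  | nil => simp [PySem.Set.update]
  | cons tag rest ih =>
    simp only [List.foldl_cons]
    have hstep := ih (vals.foldl (fun tc item => if tag ∈ item then tc.modify tag 0 (· + 1) else tc)
          (d.setdefault tag 0))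
    constructor
    · rw [hstep.1, innerA_keys _ _ _ (by
        rw [PySem.Dict.contains_setdefault]; simp)]
      rw [PySem.Dict.keys_setdefault]
      have : PySem.Set.update d.keys (tag :: rest) = PySem.Set.update (PySem.Set.add d.keys tag) rest := rfl
      rw [this, PySem.Set.add_eq_ite]
      by_cases hc : d.contains tag = true
      · rw [if_pos hc, if_pos ((PySem.Dict.contains_iff_mem_keys d tag).mp hc)]
      · rw [if_neg hc, if_neg (fun hmem => hc ((PySem.Dict.contains_iff_mem_keys d tag).mpr hmem))]
    · intro t
      rw [hstep.2 t, innerA_getD]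
      by_cases ht : t = tag
      · subst ht
        rw [PySem.Dict.getD_setdefault_self]
        simp
        ring
      · rw [PySem.Dict.getD_eq_get?_getD, PySem.Dict.get?_setdefault_of_ne _ _ ht,
          ← PySem.Dict.getD_eq_get?_getD]
        simp [ht, Ne.symm ht]

-- B: a fold of inserts whose value depends only on the key
theorem foldl_insert_fun_getD (g : String → Int) (l : List String) (d : PySem.Dict String Int) (t : String) :
    (l.foldl (fun d x => d.insert x (g x)) d).getD t 0 = if t ∈ l then g t else d.getD t 0 := by
  induction l generalizing d with
  | nil => simp
  | cons x xs ih =>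
    simp only [List.foldl_cons]
    rw [ih]
    by_cases hx : t ∈ xs
    · simp [hx]
    · simp only [if_neg hx, PySem.Dict.getD_insert, List.mem_cons]
      by_cases ht : t = x <;> simp [ht, hx]

-- B: inner loop over one user's distinct tags
theorem innerB_getD (P : String → Bool) (s : List String) :
    ∀ (b : PySem.Dict String Int) (t : String), s.Nodup →
    (s.foldl (fun b t' => if P t' then b.insert t' (b.getD t' 0 + 1) else b) b).getD t 0
      = b.getD t 0 + if t ∈ s ∧ P t = true then 1 else 0 := by
  induction s with
  | nil => intro b t _; simp
  | cons x xs ih =>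
    intro b t hs
    simp only [List.foldl_cons]
    have hxs : x ∉ xs := (List.nodup_cons.mp hs).1
    rw [ih _ t (List.nodup_cons.mp hs).2]
    by_cases ht : t = x
    · subst ht
      simp only [if_neg (fun h : t ∈ xs ∧ _ => hxs h.1), List.mem_cons, true_or, true_and]
      split_ifs with hp
      · rw [PySem.Dict.getD_insert]; simp [hp]
      · simp [hp]
    · simp only [List.mem_cons, ht, false_or]
      split_ifs with hp h2 <;>
        simp_all [PySem.Dict.getD_insert, ht]

-- B: base counter after the pass over all users
theorem baseB_getD (P : String → Bool) (vals : List (List String)) (b : PySem.Dict String Int) (t : String) :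
    (vals.foldl (fun b item =>
        (PySem.Set.ofList item).foldl (fun b t' => if P t' then b.insert t' (b.getD t' 0 + 1) else b) b) b).getD t 0
      = b.getD t 0 + if P t then (vals.countP (fun item => decide (t ∈ item)) : Int) else 0 := by
  induction vals generalizing b with
  | nil => simp
  | cons item rest ih =>
    simp only [List.foldl_cons, List.countP_cons]
    rw [ih, innerB_getD P _ _ t (PySem.Set.nodup_ofList item)]
    by_cases hp : P t = true
    · by_cases hm : t ∈ item <;>
        simp [hp, hm, PySem.Set.mem_ofList] <;> push_cast <;> ring
    · simp [hp, PySem.Set.mem_ofList]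

theorem update_nil (xs : List String) : PySem.Set.update ([] : PySem.Set String) xs = PySem.Set.ofList xs := by
  rw [PySem.Set.ofList_eq_foldl]; rfl

theorem ports_eq (tagset : List String) (usertag : List (String × List String)) :
    Get_tag_num tagset usertag = Get_tag_num_alt tagset usertag := by
  unfold Get_tag_num Get_tag_num_alt
  simp only []
  set vals := (PySem.Dict.ofList usertag).values with hv
  set dA : PySem.Dict String Int := tagset.foldl
    (fun tagcount tag =>
      vals.foldl (fun tc item => if tag ∈ item then tc.modify tag 0 (· + 1) else tc)
        (tagcount.setdefault tag 0)) PySem.Dict.empty with hdA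
  set base : PySem.Dict String Int := vals.foldl
      (fun b item =>
        (PySem.Set.ofList item).foldl
          (fun b t => if PySem.Set.contains (PySem.Set.ofList tagset) t then b.insert t (b.getD t 0 + 1) else b)
          b) PySem.Dict.empty with hbase
  set mult : PySem.Dict String Int := tagset.foldl (fun m t => m.insert t (m.getD t 0 + 1)) PySem.Dict.empty with hmult
  set dB : PySem.Dict String Int := tagset.foldl (fun out t => out.insert t (mult.getD t 0 * base.getD t 0)) PySem.Dict.empty with hdB
  have hA := outerA vals tagset PySem.Dict.empty
  have hAk : dA.keys = PySem.Set.ofList tagset := by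
    rw [hdA, hA.1, PySem.Dict.keys_empty, update_nil]
  have hBk : dB.keys = PySem.Set.ofList tagset := by
    rw [hdB, PySem.Dict.keys_foldl_insert _ (fun d x => mult.getD x 0 * base.getD x 0),
      PySem.Dict.keys_empty, update_nil]
  rw [PySem.Dict.items_eq_map_keys dA (by rw [hAk]; exact PySem.Set.nodup_ofList tagset) 0,
      PySem.Dict.items_eq_map_keys dB (by rw [hBk]; exact PySem.Set.nodup_ofList tagset) 0,
      hAk, hBk]
  apply List.map_congr_left
  intro t htmem
  have ht : t ∈ tagset := (PySem.Set.mem_ofList tagset t).mp htmem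
  have hAv : dA.getD t 0 = (tagset.count t : Int) * (vals.countP (fun item => decide (t ∈ item)) : Int) := by
    rw [hdA, hA.2 t, PySem.Dict.getD_empty]; ring
  have hP : PySem.Set.contains (PySem.Set.ofList tagset) t = true :=
    (PySem.Set.contains_iff _ t).mpr htmem
  have hBv : dB.getD t 0 = (tagset.count t : Int) * (vals.countP (fun item => decide (t ∈ item)) : Int) := by
    rw [hdB, foldl_insert_fun_getD, if_pos ht, hmult,
      PySem.Dict.getD_foldl_insert_add_one, PySem.Dict.getD_empty, hbase,
      baseB_getD, PySem.Dict.getD_empty, if_pos hP]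
    ring
  rw [hAv, hBv]

-- ===== VERDICT (by name: the statement is the Claim_ definition above) =====
theorem Get_tag_num_spec : Claim_equal_Get_tag_num := by
  intro tagset usertag _
  exact ports_eq tagset usertag
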